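-- pv_equiv track=rewrite | github.com/rtehok/perso-python | leetcode/1125_smallest-sufficient-team.py | smallestSufficientTeamBottomUp
-- ===== SOURCE A (Python) =====
-- from typing import List
--
-- def smallestSufficientTeamBottomUp(req_skills: List[str], people: List[List[str]]) -> List[int]:
--     n = len(people)
--     m = len(req_skills)
--
--     skill_id = dict()
--     for i, skill in enumerate(req_skills):
--         skill_id[skill] = i
--
--     skills_mask_of_person = [0] * n
--     for i in range(n):
--         for skill in people[i]:
--             skills_mask_of_person[i] |= 1 << skill_id[skill]
--
--     dp = [(1 << n) - 1] * (1 << m)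
--
--     dp[0] = 0
--
--     for skills_mask in range(1, 1 << m):
--         for i in range(n):
--             smaller_skill_mask = skills_mask & ~skills_mask_of_person[i]
--
--             if smaller_skill_mask != skills_mask:
--                 people_mask = dp[smaller_skill_mask] | (1 << i)
--                 if bin(people_mask).count("1") < bin(dp[skills_mask]).count("1"):
--                     dp[skills_mask] = people_mask
--
--     answer_mask = dp[(1 << m) - 1]
--     ans = []
--     for i in range(n):
--         if (answer_mask >> i) & 1:
--             ans.append(i)
--
--     return ans
-- ===== SOURCE B (Python) =====
-- from typing import List
-- from functools import lru_cache
--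
-- def smallestSufficientTeamBottomUp(req_skills: List[str], people: List[List[str]]) -> List[int]:
--     n = len(people)
--     m = len(req_skills)
--     skill_id = {skill: i for i, skill in enumerate(req_skills)}
--
--     def person_mask(p):
--         pm = 0
--         for skill in p:
--             pm |= 1 << skill_id[skill]
--         return pm
--
--     masks = [person_mask(p) for p in people]
--
--     @lru_cache(maxsize=None)
--     def solve(mask):
--         # smallest-team people-mask covering skill set `mask`
--         # (same recurrence and tie-breaking order as the DP table)
--         if mask == 0:
--             return 0
--         best = (1 << n) - 1
--         for i in range(n):
--             sub = mask & ~masks[i]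
--             if sub != mask:
--                 cand = solve(sub) | (1 << i)
--                 if cand.bit_count() < best.bit_count():
--                     best = cand
--         return best
--
--     team = solve((1 << m) - 1)
--     return [i for i in range(n) if (team >> i) & 1]
-- ===== Notes on version B (the rewrite author's own statement) =====
-- stated objective: alternative
-- what changed: Replaces the bottom-up DP table filled for all 2^m skill masks with a memoized top-down recursion from the full mask (same recurrence, initial all-people value and strict ascending tie-break), which only evaluates reachable submasks.
import Mathlib
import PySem

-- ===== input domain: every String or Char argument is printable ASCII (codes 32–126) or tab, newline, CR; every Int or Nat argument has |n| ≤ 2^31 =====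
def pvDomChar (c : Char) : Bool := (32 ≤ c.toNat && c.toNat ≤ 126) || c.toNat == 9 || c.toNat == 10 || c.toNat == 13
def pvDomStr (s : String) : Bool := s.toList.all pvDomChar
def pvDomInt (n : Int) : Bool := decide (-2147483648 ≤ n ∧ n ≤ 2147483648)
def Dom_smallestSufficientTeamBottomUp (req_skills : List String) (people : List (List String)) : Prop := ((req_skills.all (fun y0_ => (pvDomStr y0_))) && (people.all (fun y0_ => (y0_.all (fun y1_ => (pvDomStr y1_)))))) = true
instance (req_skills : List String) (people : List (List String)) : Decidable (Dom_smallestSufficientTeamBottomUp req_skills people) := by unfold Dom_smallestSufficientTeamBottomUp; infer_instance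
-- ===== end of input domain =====

-- B replaces the bottom-up DP table over all 2^m skill masks by a memoized top-down
-- recursion from the full mask (same recurrence and tie-breaking): objective 'alternative'.

-- ===== PORT A =====
-- `x & ~y` of Python on the nonnegative ints that occur here, written as a recursion
-- over binary digits (bit k of the result = bit k of a AND NOT bit k of b), structural
-- on a fuel that only makes it total (fuel a suffices: a halves each step);
-- exact for all nonnegative a, b.  Shared by both ports (both Pythons compute `mask & ~masks[i]`).
def pvAndNotGo : Nat → Nat → Nat → Nat
  | 0, _, _ => 0
  | fuel + 1, a, b => if a = 0 then 0 else 2 * pvAndNotGo fuel (a / 2) (b / 2) + (a % 2) * (1 - b % 2)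

def pvAndNot (a b : Nat) : Nat := pvAndNotGo a a b

-- the body of A's inner `for i in range(n)` loop (dp is the mutable list, i the loop variable)
def pvBodyA (masks : List Nat) (skills_mask : Int) (dp : List Nat) (i : Int) : List Nat :=
  let smaller := pvAndNot skills_mask.toNat (PySem.List.pyGetD masks i 0)
  if smaller ≠ skills_mask.toNat then
    let people_mask := PySem.List.pyGetD dp (smaller : Int) 0 ||| (1 <<< i.toNat)
    if PySem.Int.bitCount (people_mask : Int) < PySem.Int.bitCount ((PySem.List.pyGetD dp skills_mask 0 : Nat) : Int) then
      PySem.List.pySetD dp skills_mask people_mask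
    else dp
  else dp

-- A's outer-loop body: one full sweep of the inner loop for a fixed skills_mask
def pvOuterA (masks : List Nat) (n : Nat) (dp : List Nat) (skills_mask : Int) : List Nat :=
  (PySem.List.pyRange 0 (n : Int) 1).foldl (pvBodyA masks skills_mask) dp

-- port of A: bottom-up DP over all 2^m skill masks (all ints nonnegative, kept as Nat)
def smallestSufficientTeamBottomUp (req_skills : List String) (people : List (List String)) : List Int :=
  let n := people.length
  let m := req_skills.length
  let skill_id : PySem.Dict String Int :=
    (PySem.List.enumerate req_skills 0).foldl (fun d p => d.insert p.2 p.1) PySem.Dict.empty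
  -- skill_id.getD s 0: under Pre_ every looked-up skill is a key, so the default is never taken
  let smop : List Nat :=
    (PySem.List.pyRange 0 (n : Int) 1).foldl (fun lst i =>
      (PySem.List.pyGetD people i []).foldl (fun lst2 skill =>
        PySem.List.pySetD lst2 i
          (PySem.List.pyGetD lst2 i 0 ||| (1 <<< (skill_id.getD skill 0).toNat))) lst)
      (List.replicate n 0)
  let dp0 : List Nat := PySem.List.pySetD (List.replicate (1 <<< m) ((1 <<< n) - 1)) 0 0
  let dp := (PySem.List.pyRange 1 ((1 <<< m : Nat) : Int) 1).foldl (pvOuterA smop n) dp0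
  let answer_mask := PySem.List.pyGetD dp (((1 <<< m : Nat) : Int) - 1) 0
  (PySem.List.pyRange 0 (n : Int) 1).foldl (fun ans i =>
    if (answer_mask >>> i.toNat) &&& 1 ≠ 0 then ans ++ [i] else ans) ([] : List Int)

-- ===== PORT B =====
def pvPersonMask (skill_id : PySem.Dict String Int) (p : List String) : Nat :=
  p.foldl (fun pm skill => pm ||| (1 <<< (skill_id.getD skill 0).toNat)) 0

-- Source B's memoized `solve(mask)`: the recursion on mask, structural on a fuel that only
-- makes it total (every recursive call strictly decreases mask, so fuel mask+1 suffices);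
-- the lru_cache only speeds Python up, the value is this recursion
def pvSolveGo (masks : List Nat) (n : Nat) : Nat → Nat → Nat
  | 0, _ => 0
  | fuel + 1, mask =>
    if mask = 0 then 0
    else
      (List.range n).foldl (fun best i =>
        let sub := pvAndNot mask (masks.getD i 0)
        if sub ≠ mask then
          let cand := pvSolveGo masks n fuel sub ||| (1 <<< i)
          if PySem.Int.bitCount ((cand : Nat) : Int) < PySem.Int.bitCount ((best : Nat) : Int) then cand
          else best
        else best) ((1 <<< n) - 1)

def pvSolve (masks : List Nat) (n : Nat) (mask : Nat) : Nat := pvSolveGo masks n (mask + 1) mask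

-- port of B
def smallestSufficientTeamBottomUp_alt (req_skills : List String) (people : List (List String)) : List Int :=
  let n := people.length
  let m := req_skills.length
  let skill_id : PySem.Dict String Int :=
    (PySem.List.enumerate req_skills 0).foldl (fun d p => d.insert p.2 p.1) PySem.Dict.empty
  let masks := people.map (pvPersonMask skill_id)
  let team := pvSolve masks n ((1 <<< m) - 1)
  (PySem.List.pyRange 0 (n : Int) 1).filter (fun i => decide ((team >>> i.toNat) &&& 1 ≠ 0))

-- ===== PRECONDITION & SPEC =====
-- Pre_ excludes exactly the inputs where some person lists a skill absent from req_skills,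
-- on which Python A raises KeyError (B raises there too).
def Pre_smallestSufficientTeamBottomUp (req_skills : List String) (people : List (List String)) : Prop :=
  ∀ p ∈ people, ∀ s ∈ p, s ∈ req_skills
instance (req_skills : List String) (people : List (List String)) : Decidable (Pre_smallestSufficientTeamBottomUp req_skills people) := by unfold Pre_smallestSufficientTeamBottomUp; infer_instance

def pvWitness_smallestSufficientTeamBottomUp : List String × List (List String) :=
  (["java", "sql"], [["java"], ["sql", "java"], []])

def Spec_smallestSufficientTeamBottomUp (req_skills : List String) (people : List (List String)) (out : List Int) : Prop := out = smallestSufficientTeamBottomUp_alt req_skills people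
instance (req_skills : List String) (people : List (List String)) (out : List Int) : Decidable (Spec_smallestSufficientTeamBottomUp req_skills people out) := by unfold Spec_smallestSufficientTeamBottomUp; infer_instance

-- ===== CLAIM (what is proved, stated in full; the proofs are below) =====
def Claim_equal_smallestSufficientTeamBottomUp : Prop := ∀ (req_skills : List String) (people : List (List String)), Dom_smallestSufficientTeamBottomUp req_skills people → Pre_smallestSufficientTeamBottomUp req_skills people → Spec_smallestSufficientTeamBottomUp req_skills people (smallestSufficientTeamBottomUp req_skills people)

-- ===== LEMMAS AND PROOFS =====

theorem pv_getD_set_self {α : Type} [Inhabited α] (l : List α) (i : Nat) (v d : α) (h : i < l.length) :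
    (l.set i v).getD i d = v := by
  simp [List.getD, List.getElem?_set, h]

theorem pv_getD_set_ne {α : Type} (l : List α) (i j : Nat) (v d : α) (h : j ≠ i) :
    (l.set i v).getD j d = l.getD j d := by
  simp [List.getD, List.getElem?_set, h, Ne.symm h]

theorem pv_set_getD_self {α : Type} (l : List α) (i : Nat) (d : α) (h : i < l.length) :
    l.set i (l.getD i d) = l := by
  apply List.ext_getElem?
  intro j
  by_cases hj : j = i
  · subst hj; simp [List.getElem?_set, h, List.getD, List.getElem?_eq_getElem h]
  · simp [List.getElem?_set, Ne.symm hj]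

theorem pv_take_succ_set {α : Type} (l : List α) (j : Nat) (v : α) (h : j < l.length) :
    (l.set j v).take (j + 1) = l.take j ++ [v] := by
  induction l generalizing j with
  | nil => simp at h
  | cons x xs ih =>
    cases j with
    | zero => simp
    | succ j => simp [ih j (by simpa using h)]

-- collapsing Python's repeated `lst[i] |= f(s)` writes into one write of the or-accumulated value
theorem pv_foldl_set_or (skills : List String) (f : String → Nat) (j : Nat) :
    ∀ (lst : List Nat), j < lst.length →
      skills.foldl (fun l2 s => l2.set j (l2.getD j 0 ||| f s)) lst
        = lst.set j (skills.foldl (fun pm s => pm ||| f s) (lst.getD j 0)) := by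
  induction skills with
  | nil =>
    intro lst h
    simp only [List.foldl_nil]
    exact (pv_set_getD_self lst j 0 h).symm
  | cons s rest ih =>
    intro lst h
    simp only [List.foldl_cons]
    rw [ih (lst.set j (lst.getD j 0 ||| f s)) (by simpa using h)]
    rw [pv_getD_set_self _ _ _ _ h, List.set_set]

-- A's skills_mask_of_person build loop produces exactly the per-person masks
theorem pv_smop_aux (people : List (List String)) (f : String → Nat) :
    ∀ (fuel j : Nat) (lst : List Nat),
      people.length - j ≤ fuel → lst.length = people.length →
      (∀ k, j ≤ k → lst.getD k 0 = 0) →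
      (PySem.List.pyRange (j : Int) (people.length : Int) 1).foldl
        (fun lst i => (PySem.List.pyGetD people i []).foldl (fun lst2 skill =>
          PySem.List.pySetD lst2 i (PySem.List.pyGetD lst2 i 0 ||| f skill)) lst) lst
      = lst.take j ++ (people.drop j).map (fun p => p.foldl (fun pm s => pm ||| f s) 0) := by
  intro fuel
  induction fuel with
  | zero =>
    intro j lst hfuel hlen _
    have hj : people.length ≤ j := by omega
    rw [PySem.List.pyRange_one_eq_nil (by exact_mod_cast hj)]
    rw [List.take_of_length_le (by omega), List.drop_eq_nil_of_le hj]
    simp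
  | succ fuel ih =>
    intro j lst hfuel hlen hz
    by_cases hj : j < people.length
    · rw [PySem.List.pyRange_one_cons (by exact_mod_cast hj), List.foldl_cons]
      have hcast : ((j : Int) + 1) = ((j + 1 : Nat) : Int) := by push_cast; ring
      rw [hcast]
      have hbody :
          (PySem.List.pyGetD people (j : Int) []).foldl (fun lst2 skill =>
            PySem.List.pySetD lst2 (j : Int) (PySem.List.pyGetD lst2 (j : Int) 0 ||| f skill)) lst
            = lst.set j (people[j].foldl (fun pm s => pm ||| f s) 0) := by
        simp only [PySem.List.pyGetD_natCast, PySem.List.pySetD_natCast]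
        rw [pv_foldl_set_or _ f j lst (by omega), hz j (le_refl j)]
        congr 2
        simp [List.getD, List.getElem?_eq_getElem hj]
      rw [hbody]
      rw [ih (j + 1) _ (by omega) (by simp [hlen])
            (fun k hk => by
              rw [pv_getD_set_ne _ _ _ _ _ (by omega)]
              exact hz k (by omega))]
      rw [pv_take_succ_set _ _ _ (by omega)]
      simp [List.drop_eq_getElem_cons
        (show j < (people.map (fun p => p.foldl (fun pm s => pm ||| f s) 0)).length by
          simpa using hj)]
    · have hj' : people.length ≤ j := by omega
      rw [PySem.List.pyRange_one_eq_nil (by exact_mod_cast hj')]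
      rw [List.take_of_length_le (by omega), List.drop_eq_nil_of_le hj']
      simp

theorem pv_smop_eq (people : List (List String)) (f : String → Nat) :
    (PySem.List.pyRange 0 (people.length : Int) 1).foldl
      (fun lst i => (PySem.List.pyGetD people i []).foldl (fun lst2 skill =>
        PySem.List.pySetD lst2 i (PySem.List.pyGetD lst2 i 0 ||| f skill)) lst)
      (List.replicate people.length 0)
    = people.map (fun p => p.foldl (fun pm s => pm ||| f s) 0) := by
  have hz : ∀ k : Nat, (List.replicate people.length (0 : Nat)).getD k 0 = 0 := by
    intro k
    simp only [List.getD, List.getElem?_replicate]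
    split <;> rfl
  have := pv_smop_aux people f people.length 0 (List.replicate people.length 0)
    (by omega) (by simp) (fun k _ => hz k)
  simpa using this

theorem pvBodyA_natCast (masks dp : List Nat) (M i : Nat) :
    pvBodyA masks (M : Int) dp (i : Int)
      = (if pvAndNot M (masks.getD i 0) ≠ M then
           (if PySem.Int.bitCount ((dp.getD (pvAndNot M (masks.getD i 0)) 0 ||| (1 <<< i) : Nat) : Int)
                < PySem.Int.bitCount ((dp.getD M 0 : Nat) : Int)
            then dp.set M (dp.getD (pvAndNot M (masks.getD i 0)) 0 ||| (1 <<< i))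
            else dp)
         else dp) := by
  simp only [pvBodyA, PySem.List.pyGetD_natCast, PySem.List.pySetD_natCast, Int.toNat_natCast]

theorem pv_smop_eq_mask (people : List (List String)) (sid : PySem.Dict String Int) :
    (PySem.List.pyRange 0 (people.length : Int) 1).foldl
      (fun lst i => (PySem.List.pyGetD people i []).foldl (fun lst2 skill =>
        PySem.List.pySetD lst2 i
          (PySem.List.pyGetD lst2 i 0 ||| (1 <<< (sid.getD skill 0).toNat))) lst)
      (List.replicate people.length 0)
    = people.map (pvPersonMask sid) := by
  rw [pv_smop_eq people (fun skill => 1 <<< (sid.getD skill 0).toNat)]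
  simp [pvPersonMask]

-- proof-only: the step of Source B's inner loop, with the recursion written via the total wrapper
def pvStep (masks : List Nat) (n mask : Nat) (best i : Nat) : Nat :=
  let sub := pvAndNot mask (masks.getD i 0)
  if sub ≠ mask then
    let cand := pvSolve masks n sub ||| (1 <<< i)
    if PySem.Int.bitCount ((cand : Nat) : Int) < PySem.Int.bitCount ((best : Nat) : Int) then cand
    else best
  else best

theorem pvAndNotGo_le : ∀ (fuel a b : Nat), pvAndNotGo fuel a b ≤ a := by
  intro fuel
  induction fuel with
  | zero => intro a b; simp [pvAndNotGo]
  | succ fuel ih =>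
    intro a b
    rw [pvAndNotGo]
    split
    · omega
    · have h2 := ih (a / 2) (b / 2)
      have h3 : a % 2 * (1 - b % 2) ≤ a % 2 * 1 := Nat.mul_le_mul_left _ (by omega)
      omega

theorem pvAndNot_le (a b : Nat) : pvAndNot a b ≤ a := pvAndNotGo_le a a b

theorem pvSolveGo_congr : ∀ (f1 : Nat) (masks : List Nat) (n mask f2 : Nat),
    mask < f1 → mask < f2 → pvSolveGo masks n f1 mask = pvSolveGo masks n f2 mask := by
  intro f1
  induction f1 with
  | zero => intro _ _ _ _ h1 _; omega
  | succ g1 ih =>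
    intro masks n mask f2 h1 h2
    obtain ⟨g2, rfl⟩ : ∃ g2, f2 = g2 + 1 := ⟨f2 - 1, by omega⟩
    rw [pvSolveGo, pvSolveGo]
    by_cases h0 : mask = 0
    · simp [h0]
    · rw [if_neg h0, if_neg h0]
      apply PySem.List.foldl_congr_mem
      intro best i _
      by_cases hne : pvAndNot mask (masks.getD i 0) ≠ mask
      · have hlt : pvAndNot mask (masks.getD i 0) < mask :=
          Nat.lt_of_le_of_ne (pvAndNot_le _ _) hne
        simp only [if_pos hne]
        rw [ih masks n _ g2 (by omega) (by omega)]
      · simp only [if_neg hne]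

-- Source B's solve, characterized without the fuel
theorem pvSolve_eq (masks : List Nat) (n mask : Nat) :
    pvSolve masks n mask
      = if mask = 0 then 0
        else (List.range n).foldl (pvStep masks n mask) ((1 <<< n) - 1) := by
  rw [pvSolve, pvSolveGo]
  by_cases h0 : mask = 0
  · simp [h0]
  · rw [if_neg h0, if_neg h0]
    apply PySem.List.foldl_congr_mem
    intro best i _
    simp only [pvStep]
    by_cases hne : pvAndNot mask (masks.getD i 0) ≠ mask
    · have hlt : pvAndNot mask (masks.getD i 0) < mask :=
        Nat.lt_of_le_of_ne (pvAndNot_le _ _) hne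
      simp only [if_pos hne]
      rw [pvSolve,
          pvSolveGo_congr mask masks n (pvAndNot mask (masks.getD i 0))
            (pvAndNot mask (masks.getD i 0) + 1) (by omega) (by omega)]
    · simp only [if_neg hne]

-- one inner sweep of A's dp loop for mask M equals writing the answer of Source B's
-- inner loop (resumed from index i with accumulator best) at index M
theorem pv_inner_eq (masks : List Nat) (n Lm M : Nat) (hM : M < Lm) :
    ∀ (fuel i : Nat) (dp : List Nat) (best : Nat),
      n - i ≤ fuel → dp.length = Lm → dp.getD M 0 = best →
      (∀ j, j < M → dp.getD j 0 = pvSolve masks n j) →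
      (PySem.List.pyRange (i : Int) (n : Int) 1).foldl (pvBodyA masks (M : Int)) dp
        = dp.set M (((List.range n).drop i).foldl (pvStep masks n M) best) := by
  intro fuel
  induction fuel with
  | zero =>
    intro i dp best hfuel hlen hbest hsub
    have hi : n ≤ i := by omega
    rw [PySem.List.pyRange_one_eq_nil (by exact_mod_cast hi), List.foldl_nil,
        List.drop_eq_nil_of_le (by simpa using hi), List.foldl_nil, ← hbest,
        pv_set_getD_self _ _ _ (by omega)]
  | succ fuel ih =>
    intro i dp best hfuel hlen hbest hsub
    by_cases hi : i < n
    · have hMlen : M < dp.length := by omega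
      have hdrop : (List.range n).drop i = i :: (List.range n).drop (i + 1) := by
        rw [List.drop_eq_getElem_cons (by simpa using hi)]
        simp
      rw [PySem.List.pyRange_one_cons (by exact_mod_cast hi), List.foldl_cons]
      have hcast : ((i : Int) + 1) = ((i + 1 : Nat) : Int) := by push_cast; ring
      rw [hcast, hdrop, List.foldl_cons, pvBodyA_natCast]
      simp only [pvStep]
      by_cases hne : pvAndNot M (masks.getD i 0) ≠ M
      · have hlt : pvAndNot M (masks.getD i 0) < M :=
          Nat.lt_of_le_of_ne (pvAndNot_le _ _) hne
        rw [hsub _ hlt, hbest, if_pos hne, if_pos hne]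
        by_cases hcmp : PySem.Int.bitCount
              ((pvSolve masks n (pvAndNot M (masks.getD i 0)) ||| (1 <<< i) : Nat) : Int)
            < PySem.Int.bitCount ((best : Nat) : Int)
        · rw [if_pos hcmp, if_pos hcmp,
              ih (i + 1) _ _ (by omega) (by simp [hlen])
                (pv_getD_set_self _ _ _ _ hMlen)
                (fun j hj => by
                  rw [pv_getD_set_ne _ _ _ _ _ (by omega)]
                  exact hsub j hj),
              List.set_set]
        · rw [if_neg hcmp, if_neg hcmp, ih (i + 1) _ _ (by omega) hlen hbest hsub]
      · rw [if_neg hne, if_neg hne, ih (i + 1) _ _ (by omega) hlen hbest hsub]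
    · have hi' : n ≤ i := by omega
      rw [PySem.List.pyRange_one_eq_nil (by exact_mod_cast hi'), List.foldl_nil,
          List.drop_eq_nil_of_le (by simpa using hi'), List.foldl_nil, ← hbest,
          pv_set_getD_self _ _ _ (by omega)]

-- the outer dp loop: after processing masks 1..K-1, dp holds pvSolve below K and the initial value above
theorem pv_outer_eq (masks : List Nat) (n Lm : Nat) (hL : 0 < Lm) :
    ∀ K, 1 ≤ K → K ≤ Lm →
      ((PySem.List.pyRange 1 (K : Int) 1).foldl (pvOuterA masks n)
          ((List.replicate Lm ((1 <<< n) - 1)).set 0 0)).length = Lm ∧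
      (∀ j, j < K → ((PySem.List.pyRange 1 (K : Int) 1).foldl (pvOuterA masks n)
          ((List.replicate Lm ((1 <<< n) - 1)).set 0 0)).getD j 0 = pvSolve masks n j) ∧
      (∀ j, K ≤ j → j < Lm → ((PySem.List.pyRange 1 (K : Int) 1).foldl (pvOuterA masks n)
          ((List.replicate Lm ((1 <<< n) - 1)).set 0 0)).getD j 0 = (1 <<< n) - 1) := by
  intro K hK1
  induction K, hK1 using Nat.le_induction with
  | base =>
    intro _
    rw [PySem.List.pyRange_one_eq_nil (by norm_num), List.foldl_nil]
    refine ⟨by simp, ?_, ?_⟩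
    · intro j hj
      interval_cases j
      rw [pv_getD_set_self _ _ _ _ (by simpa using hL)]
      rw [pvSolve_eq]
      simp
    · intro j hj1 hj2
      rw [pv_getD_set_ne _ _ _ _ _ (by omega)]
      simp only [List.getD, List.getElem?_replicate]
      rw [if_pos hj2]
      rfl
  | succ K hK ih =>
    intro hKL
    obtain ⟨ihlen, ihlo, ihhi⟩ := ih (by omega)
    have hKLm : K < Lm := by omega
    have hcast : ((K + 1 : Nat) : Int) = (K : Int) + 1 := by push_cast; ring
    rw [hcast, PySem.List.pyRange_one_succ_right (by exact_mod_cast hK), List.foldl_append,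
        List.foldl_cons, List.foldl_nil]
    set dpK := (PySem.List.pyRange 1 (K : Int) 1).foldl (pvOuterA masks n)
        ((List.replicate Lm ((1 <<< n) - 1)).set 0 0) with hdpK
    have hinner := pv_inner_eq masks n Lm K hKLm n 0 dpK (dpK.getD K 0)
        (by omega) ihlen rfl (fun j hj => ihlo j hj)
    have hbestinit : dpK.getD K 0 = (1 <<< n) - 1 := ihhi K (le_refl K) hKLm
    rw [hbestinit] at hinner
    have houter : pvOuterA masks n dpK (K : Int)
        = dpK.set K (((List.range n).drop 0).foldl (pvStep masks n K) ((1 <<< n) - 1)) := by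
      rw [pvOuterA, ← hinner]
      norm_num
    rw [houter]
    have hsolveK : ((List.range n).drop 0).foldl (pvStep masks n K) ((1 <<< n) - 1) = pvSolve masks n K := by
      rw [List.drop_zero, pvSolve_eq, if_neg (by omega)]
    rw [hsolveK]
    refine ⟨by simpa using ihlen, ?_, ?_⟩
    · intro j hj
      by_cases hjK : j = K
      · subst hjK
        rw [pv_getD_set_self _ _ _ _ (by omega)]
      · rw [pv_getD_set_ne _ _ _ _ _ hjK]
        exact ihlo j (by omega)
    · intro j hj1 hj2
      rw [pv_getD_set_ne _ _ _ _ _ (by omega)]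
      exact ihhi j (by omega) hj2

-- ===== VERDICT (by name: the statement is the Claim_ definition above) =====
theorem smallestSufficientTeamBottomUp_spec : Claim_equal_smallestSufficientTeamBottomUp := by
  intro req_skills people _ _
  unfold Spec_smallestSufficientTeamBottomUp
  simp only [smallestSufficientTeamBottomUp, smallestSufficientTeamBottomUp_alt]
  rw [pv_smop_eq_mask people ((PySem.List.enumerate req_skills 0).foldl
      (fun d p => d.insert p.2 p.1) PySem.Dict.empty)]
  have hpos : 0 < (1 <<< req_skills.length : Nat) := by
    rw [Nat.one_shiftLeft]
    exact Nat.two_pow_pos _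
  have hdp0 : PySem.List.pySetD (List.replicate (1 <<< req_skills.length) ((1 <<< people.length) - 1)) (0 : Int) 0
      = (List.replicate (1 <<< req_skills.length : Nat) ((1 <<< people.length) - 1)).set 0 0 := by
    have h0 : (0 : Int) = ((0 : Nat) : Int) := by norm_num
    rw [h0, PySem.List.pySetD_natCast]
  rw [hdp0]
  obtain ⟨hlen, hlo, _⟩ := pv_outer_eq
      (people.map (pvPersonMask ((PySem.List.enumerate req_skills 0).foldl
        (fun d p => d.insert p.2 p.1) PySem.Dict.empty)))
      people.length (1 <<< req_skills.length) hpos (1 <<< req_skills.length) (by omega) (le_refl _)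
  have hidx : ((1 <<< req_skills.length : Nat) : Int) - (1 : Int) = (((1 <<< req_skills.length) - 1 : Nat) : Int) := by
    omega
  rw [hidx, PySem.List.pyGetD_natCast]
  rw [hlo ((1 <<< req_skills.length) - 1) (by omega)]
  rw [PySem.List.foldl_append_ite_eq_filter]
  simp
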